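-- pv_equiv track=rewrite | github.com/mijahauan/sigmond | lib/sigmond/tui/screens/cpu_affinity.py | _format_cpu_list
-- ===== SOURCE A (Python) =====
-- def _format_cpu_list(cpus) -> str:
--     """Render a CPU set as a compact range list, e.g. '0-3, 8, 10-11'."""
--     if not cpus:
--         return "(none)"
--     sorted_cpus = sorted(cpus)
--     parts: list = []
--     start = prev = sorted_cpus[0]
--     for c in sorted_cpus[1:]:
--         if c == prev + 1:
--             prev = c
--             continue
--         parts.append(f"{start}" if start == prev else f"{start}-{prev}")
--         start = prev = c
--     parts.append(f"{start}" if start == prev else f"{start}-{prev}")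
--     return ", ".join(parts)
-- ===== SOURCE B (Python) =====
-- def _format_cpu_list(cpus) -> str:
--     """Render a CPU set as a compact range list, e.g. '0-3, 8, 10-11'."""
--     if not cpus:
--         return "(none)"
--     s = sorted(cpus)
--     n = len(s)
--     # stage 1: all break positions (where a new run starts), as plain indices
--     cuts = [0] + [i for i in range(1, n) if s[i] != s[i - 1] + 1] + [n]
--     # stage 2: format each segment [a, b) by its first and last element
--     parts = [f"{s[a]}" if b == a + 1 else f"{s[a]}-{s[b - 1]}"
--              for a, b in zip(cuts, cuts[1:])]
--     return ", ".join(parts)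
-- ===== Notes on version B (the rewrite author's own statement) =====
-- stated objective: alternative
-- what changed: B replaces A's forward scan with start/prev accumulator state by two staged passes over the sorted list: first compute the list of break indices i with s[i] != s[i-1]+1, then format each segment between consecutive cut positions from its first and last element via zip over the cut list.
import Mathlib
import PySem

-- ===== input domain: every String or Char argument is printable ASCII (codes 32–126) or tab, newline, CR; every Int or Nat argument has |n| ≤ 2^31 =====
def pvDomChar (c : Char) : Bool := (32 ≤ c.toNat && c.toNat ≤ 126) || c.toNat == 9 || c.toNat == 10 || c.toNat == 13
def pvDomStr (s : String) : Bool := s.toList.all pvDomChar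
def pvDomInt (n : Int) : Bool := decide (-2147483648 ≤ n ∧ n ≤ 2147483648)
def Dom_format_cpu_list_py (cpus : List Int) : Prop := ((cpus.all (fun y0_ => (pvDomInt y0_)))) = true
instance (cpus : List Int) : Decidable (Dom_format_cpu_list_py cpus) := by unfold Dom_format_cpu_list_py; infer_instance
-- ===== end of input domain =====

-- B computes the sorted list's break indices in one staged pass and then formats the segments
-- between consecutive cut positions, instead of A's forward scan with start/prev accumulator state.

-- ===== PORT A =====
def format_cpu_list_py (cpus : List Int) : String :=
  if cpus = [] then "(none)"
  else
    match PySem.List.sorted cpus (fun x => x) false with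
    | [] => ""  -- unreachable: sorted of a nonempty list is nonempty
    | h :: t =>
      let st := t.foldl (fun (s : List String × Int × Int) c =>
        if c = s.2.2 + 1 then (s.1, s.2.1, c)
        else (s.1 ++ [if s.2.1 = s.2.2 then PySem.Int.toStr s.2.1
                      else PySem.Int.toStr s.2.1 ++ "-" ++ PySem.Int.toStr s.2.2], c, c))
        ([], h, h)
      PySem.Str.join ", "
        (st.1 ++ [if st.2.1 = st.2.2 then PySem.Int.toStr st.2.1
                  else PySem.Int.toStr st.2.1 ++ "-" ++ PySem.Int.toStr st.2.2])

-- ===== PORT B =====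
def format_cpu_list_py_alt (cpus : List Int) : String :=
  if cpus = [] then "(none)"
  else
    let s := PySem.List.sorted cpus (fun x => x) false
    let n : Int := s.length
    -- cuts = [0] + [i for i in range(1, n) if s[i] != s[i-1]+1] + [n]
    let cuts : List Int := [0] ++ ((PySem.List.pyRange 1 n 1).filter
        (fun i => decide (PySem.List.pyGetD s i 0 ≠ PySem.List.pyGetD s (i - 1) 0 + 1))) ++ [n]
    -- parts = [f"{s[a]}" if b == a+1 else f"{s[a]}-{s[b-1]}" for a, b in zip(cuts, cuts[1:])]
    let parts := (cuts.zip (PySem.List.slice cuts (some 1) none)).map (fun ab =>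
      if ab.2 = ab.1 + 1 then PySem.Int.toStr (PySem.List.pyGetD s ab.1 0)
      else PySem.Int.toStr (PySem.List.pyGetD s ab.1 0) ++ "-" ++
           PySem.Int.toStr (PySem.List.pyGetD s (ab.2 - 1) 0))
    PySem.Str.join ", " parts

-- ===== PRECONDITION & SPEC =====
def Spec_format_cpu_list_py (cpus : List Int) (out : String) : Prop := out = format_cpu_list_py_alt cpus
instance (cpus : List Int) (out : String) : Decidable (Spec_format_cpu_list_py cpus out) := by unfold Spec_format_cpu_list_py; infer_instance

-- ===== CLAIM (what is proved, stated in full; the proofs are below) =====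
def Claim_equal_format_cpu_list_py : Prop := ∀ (cpus : List Int), Dom_format_cpu_list_py cpus → Spec_format_cpu_list_py cpus (format_cpu_list_py cpus)

-- ===== LEMMAS AND PROOFS =====

-- formatting of one (start, end) run
def pvFmtRun (r : Int × Int) : String :=
  if r.1 = r.2 then PySem.Int.toStr r.1 else PySem.Int.toStr r.1 ++ "-" ++ PySem.Int.toStr r.2

-- canonical forward grouping into maximal runs of consecutive values
def pvGroupRuns (s p : Int) : List Int → List (Int × Int)
  | [] => [(s, p)]
  | c :: t => if c = p + 1 then pvGroupRuns s c t else (s, p) :: pvGroupRuns c c t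

def pvFirstEnd (p : Int) : List Int → Int
  | [] => p
  | c :: t => if c = p + 1 then pvFirstEnd c t else p

def pvRestRuns (p : Int) : List Int → List (Int × Int)
  | [] => []
  | c :: t => if c = p + 1 then pvRestRuns c t else pvGroupRuns c c t

theorem pvGroupRuns_decomp (t : List Int) (s p : Int) :
    pvGroupRuns s p t = (s, pvFirstEnd p t) :: pvRestRuns p t := by
  induction t generalizing s p with
  | nil => rfl
  | cons c t ih =>
    simp only [pvGroupRuns, pvFirstEnd, pvRestRuns]
    split_ifs with h
    · exact ih _ _
    · rfl

theorem pvFirstEnd_ge (t : List Int) (p : Int) : p ≤ pvFirstEnd p t := by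
  induction t generalizing p with
  | nil => exact le_refl _
  | cons c t ih =>
    simp only [pvFirstEnd]
    split_ifs with h
    · exact le_trans (by omega) (ih c)
    · exact le_refl _

-- A's loop step and finalization
def pvStepA (s : List String × Int × Int) (c : Int) : List String × Int × Int :=
  if c = s.2.2 + 1 then (s.1, s.2.1, c)
  else (s.1 ++ [if s.2.1 = s.2.2 then PySem.Int.toStr s.2.1
                else PySem.Int.toStr s.2.1 ++ "-" ++ PySem.Int.toStr s.2.2], c, c)

def pvFinA (st : List String × Int × Int) : List String :=
  st.1 ++ [if st.2.1 = st.2.2 then PySem.Int.toStr st.2.1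
           else PySem.Int.toStr st.2.1 ++ "-" ++ PySem.Int.toStr st.2.2]

theorem pvFoldlA (t : List Int) (parts : List String) (s p : Int) :
    pvFinA (t.foldl pvStepA (parts, s, p)) = parts ++ (pvGroupRuns s p t).map pvFmtRun := by
  induction t generalizing parts s p with
  | nil => simp [pvGroupRuns, pvFmtRun, pvFinA]
  | cons c t ih =>
    by_cases h : c = p + 1
    · simp only [List.foldl, pvGroupRuns, pvStepA, if_pos h]
      exact ih parts s c
    · simp only [List.foldl, pvGroupRuns, pvStepA, if_neg h]
      rw [ih]
      simp [pvFmtRun, List.append_assoc]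

-- B's Nat-level staged computation
def pvP (s : List Int) (i : Nat) : Bool := decide (s.getD i 0 ≠ s.getD (i - 1) 0 + 1)

def pvBrks (s : List Int) : List Nat := (List.range' 1 (s.length - 1)).filter (pvP s)

def pvTail (s : List Int) : List Nat := pvBrks s ++ [s.length]

def pvFmtN (s : List Int) (ab : Nat × Nat) : String :=
  if ab.2 = ab.1 + 1 then PySem.Int.toStr (s.getD ab.1 0)
  else PySem.Int.toStr (s.getD ab.1 0) ++ "-" ++ PySem.Int.toStr (s.getD (ab.2 - 1) 0)

def pvPartsN (s : List Int) : List String :=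
  ((0 :: pvTail s).zip (pvTail s)).map (pvFmtN s)

theorem pvTail_ne_nil (s : List Int) : pvTail s ≠ [] := by
  simp [pvTail]

theorem pvTail_pos (s : List Int) (hs : s ≠ []) : ∀ b ∈ pvTail s, 1 ≤ b := by
  intro b hb
  rcases List.mem_append.1 hb with h | h
  · obtain ⟨i, hi, rfl⟩ := List.mem_range'.1 (List.mem_of_mem_filter h)
    omega
  · simp only [List.mem_singleton] at h
    subst h
    exact List.length_pos_iff.2 hs

-- the break list of h :: c :: t' in terms of the break list of c :: t'
theorem pvTail_shift (h c : Int) (t' : List Int) :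
    pvTail (h :: c :: t') =
      (if c = h + 1 then [] else [1]) ++ (pvTail (c :: t')).map (· + 1) := by
  have hr2 : List.range' 2 t'.length = (List.range' 1 t'.length).map (· + 1) := by
    rw [List.range'_eq_map_range, List.range'_eq_map_range, List.map_map]
    apply List.map_congr_left
    intro x _
    simp only [Function.comp_apply]
    omega
  have hP1 : pvP (h :: c :: t') 1 = decide (c ≠ h + 1) := by
    simp [pvP]
  have hPshift : ∀ i ∈ List.range' 1 t'.length,
      pvP (h :: c :: t') (i + 1) = pvP (c :: t') i := by
    intro i hi
    obtain ⟨k, hk, rfl⟩ := List.mem_range'.1 hi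
    have h1 : 1 + 1 * k = k + 1 := by omega
    rw [h1]
    simp [pvP]
  have hbrks : pvBrks (h :: c :: t') =
      (if c = h + 1 then [] else [1]) ++ (pvBrks (c :: t')).map (· + 1) := by
    show (List.range' 1 ((t'.length + 2) - 1)).filter (pvP (h :: c :: t')) = _
    have hlen : (t'.length + 2) - 1 = t'.length + 1 := by omega
    rw [hlen, List.range'_succ, List.filter_cons, hP1, hr2, List.filter_map]
    have hfc : ((List.range' 1 t'.length).filter (pvP (h :: c :: t') ∘ (· + 1))) =
        (List.range' 1 t'.length).filter (pvP (c :: t')) := by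
      apply List.filter_congr
      intro i hi
      exact hPshift i hi
    rw [hfc]
    by_cases hc : c = h + 1
    · simp [hc, pvBrks]
    · simp [hc, pvBrks]
  show pvBrks (h :: c :: t') ++ [t'.length + 2] = _
  rw [hbrks]
  have : ([t'.length + 2] : List Nat) = ([(c :: t').length].map (· + 1)) := by simp
  rw [this]
  show _ = (if c = h + 1 then [] else [1]) ++ (pvBrks (c :: t') ++ [(c :: t').length]).map (· + 1)
  rw [List.map_append, List.append_assoc]

-- headD of a map over a nonempty list
theorem pvHeadD_map_succ (l : List Nat) (hl : l ≠ []) :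
    (l.map (· + 1)).headD 1 = l.headD 1 + 1 := by
  cases l with
  | nil => exact absurd rfl hl
  | cons a r => rfl

-- the first cut names the end of the first run
theorem pvHead_firstEnd (t : List Int) (c : Int) :
    (c :: t).getD ((pvTail (c :: t)).headD 1 - 1) 0 = pvFirstEnd c t := by
  induction t generalizing c with
  | nil => simp [pvTail, pvBrks, pvFirstEnd]
  | cons x u ih =>
    rw [pvTail_shift c x u]
    by_cases hx : x = c + 1
    · rw [if_pos hx, List.nil_append,
        pvHeadD_map_succ _ (pvTail_ne_nil (x :: u))]
      have hd1 : 1 ≤ (pvTail (x :: u)).headD 1 := by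
        apply pvTail_pos (x :: u) (by simp)
        cases hne : pvTail (x :: u) with
        | nil => exact absurd hne (pvTail_ne_nil (x :: u))
        | cons a r => simp
      obtain ⟨j, hj⟩ : ∃ j, (pvTail (x :: u)).headD 1 = j + 1 := ⟨_, (Nat.succ_pred_eq_of_pos hd1).symm⟩
      rw [hj]
      have : j + 1 + 1 - 1 = j + 1 := by omega
      rw [this, List.getD_cons_succ]
      have := ih x
      rw [hj] at this
      simp only [Nat.add_sub_cancel] at this
      rw [this]
      simp [pvFirstEnd, if_pos hx]
    · rw [if_neg hx]
      simp [pvFirstEnd, if_neg hx]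

-- shifting one formatted segment past a prepended head element
theorem pvFmtN_shift (h : Int) (r : List Int) (a b : Nat) (hb : 1 ≤ b) :
    pvFmtN (h :: r) (a + 1, b + 1) = pvFmtN r (a, b) := by
  obtain ⟨j, rfl⟩ : ∃ j, b = j + 1 := ⟨b - 1, by omega⟩
  simp only [pvFmtN, Nat.add_sub_cancel, List.getD_cons_succ]
  by_cases hab : j + 1 = a + 1
  · rw [if_pos (by omega), if_pos hab]
  · rw [if_neg (by omega), if_neg hab]

theorem pvMapShift (h : Int) (r : List Int) (A B : List Nat) (hB : ∀ b ∈ B, 1 ≤ b) :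
    ((A.map (· + 1)).zip (B.map (· + 1))).map (pvFmtN (h :: r)) = (A.zip B).map (pvFmtN r) := by
  rw [List.zip_map, List.map_map]
  apply List.map_congr_left
  intro p hp
  obtain ⟨a, b⟩ := p
  have hb := hB b (List.of_mem_zip hp).2
  simpa [Prod.map] using pvFmtN_shift h r a b hb

-- main correspondence: B's staged parts are the formatted maximal runs
theorem pvPartsN_eq (t : List Int) (h : Int) :
    pvPartsN (h :: t) = pvFmtRun (h, pvFirstEnd h t) :: (pvRestRuns h t).map pvFmtRun := by
  induction t generalizing h with
  | nil => simp [pvPartsN, pvTail, pvBrks, pvFmtN, pvFirstEnd, pvRestRuns, pvFmtRun]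
  | cons c t' ih =>
    by_cases hc : c = h + 1
    · rcases hds : pvTail (c :: t') with _ | ⟨d1, ds⟩
      · exact absurd hds (pvTail_ne_nil _)
      have hd1 : 1 ≤ d1 :=
        pvTail_pos (c :: t') (by simp) d1 (by rw [hds]; exact List.mem_cons_self ..)
      have hdspos : ∀ b ∈ ds, 1 ≤ b := fun b hb =>
        pvTail_pos (c :: t') (by simp) b (by rw [hds]; exact List.mem_cons_of_mem _ hb)
      have hIH := ih c
      have hparts : pvPartsN (c :: t') =
          pvFmtN (c :: t') (0, d1) :: ((d1 :: ds).zip ds).map (pvFmtN (c :: t')) := by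
        unfold pvPartsN
        rw [hds]
        rfl
      rw [hparts] at hIH
      injection hIH with hHead hTail
      have hE : (c :: t').getD (d1 - 1) 0 = pvFirstEnd c t' := by
        have h0 := pvHead_firstEnd t' c
        rw [hds] at h0
        simpa using h0
      have hgoalL : pvPartsN (h :: c :: t') =
          pvFmtN (h :: c :: t') (0, d1 + 1) ::
            (((d1 :: ds).map (· + 1)).zip (ds.map (· + 1))).map (pvFmtN (h :: c :: t')) := by
        unfold pvPartsN
        rw [pvTail_shift h c t', if_pos hc, List.nil_append, hds]
        rfl
      rw [hgoalL, pvMapShift h (c :: t') (d1 :: ds) ds hdspos, hTail]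
      have hhead : pvFmtN (h :: c :: t') (0, d1 + 1) =
          PySem.Int.toStr h ++ "-" ++ PySem.Int.toStr (pvFirstEnd c t') := by
        obtain ⟨j, rfl⟩ : ∃ j, d1 = j + 1 := ⟨d1 - 1, by omega⟩
        simp only [Nat.add_sub_cancel] at hE
        simp only [pvFmtN, Nat.add_sub_cancel, List.getD_cons_zero, List.getD_cons_succ]
        rw [if_neg (by omega), hE]
      rw [hhead]
      have hfe : pvFirstEnd h (c :: t') = pvFirstEnd c t' := by simp [pvFirstEnd, hc]
      have hrr : pvRestRuns h (c :: t') = pvRestRuns c t' := by simp [pvRestRuns, hc]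
      rw [hfe, hrr]
      have hne : h ≠ pvFirstEnd c t' := by
        have := pvFirstEnd_ge t' c
        omega
      simp [pvFmtRun, hne]
    · have hgoalL : pvPartsN (h :: c :: t') =
          pvFmtN (h :: c :: t') (0, 1) ::
            (((0 :: pvTail (c :: t')).map (· + 1)).zip ((pvTail (c :: t')).map (· + 1))).map
              (pvFmtN (h :: c :: t')) := by
        unfold pvPartsN
        rw [pvTail_shift h c t', if_neg hc]
        rfl
      rw [hgoalL, pvMapShift h (c :: t') (0 :: pvTail (c :: t')) (pvTail (c :: t'))
            (pvTail_pos (c :: t') (by simp))]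
      show pvFmtN (h :: c :: t') (0, 1) :: pvPartsN (c :: t') = _
      rw [ih c]
      have hfe : pvFirstEnd h (c :: t') = h := by simp [pvFirstEnd, hc]
      have hrr : pvRestRuns h (c :: t') = pvGroupRuns c c t' := by simp [pvRestRuns, hc]
      rw [hfe, hrr, pvGroupRuns_decomp]
      simp [pvFmtN, pvFmtRun]

-- cast bridge: the Int-level break filter is the Nat-level one
theorem pvCastFilter (s : List Int) :
    (PySem.List.pyRange 1 (s.length : Int) 1).filter
      (fun i => decide (PySem.List.pyGetD s i 0 ≠ PySem.List.pyGetD s (i - 1) 0 + 1)) =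
    (pvBrks s).map (fun k : Nat => (k : Int)) := by
  rw [PySem.List.pyRange_one]
  have h1 : ((s.length : Int) - 1).toNat = s.length - 1 := by omega
  rw [h1]
  have h2 : (List.range (s.length - 1)).map (fun k : Nat => (1 : Int) + (k : Int)) =
      ((List.range' 1 (s.length - 1)).map (fun k : Nat => (k : Int))) := by
    rw [List.range'_eq_map_range, List.map_map]
    apply List.map_congr_left
    intro x _
    simp only [Function.comp_apply]
    push_cast
    ring
  rw [h2, List.filter_map]
  unfold pvBrks
  congr 1
  apply List.filter_congr
  intro i hi
  obtain ⟨k, hk, rfl⟩ := List.mem_range'.1 hi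
  simp only [Function.comp_apply]
  have hk1 : 1 + 1 * k = k + 1 := by omega
  rw [hk1]
  have hm1 : (((k + 1 : Nat) : Int)) - 1 = ((k : Nat) : Int) := by push_cast; ring
  rw [hm1, PySem.List.pyGetD_natCast, PySem.List.pyGetD_natCast]
  simp [pvP]

-- cast bridge for one formatted segment
theorem pvFmtCast (s : List Int) (a b : Nat) (hb : 1 ≤ b) :
    (if (b : Int) = (a : Int) + 1 then PySem.Int.toStr (PySem.List.pyGetD s (a : Int) 0)
     else PySem.Int.toStr (PySem.List.pyGetD s (a : Int) 0) ++ "-" ++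
          PySem.Int.toStr (PySem.List.pyGetD s ((b : Int) - 1) 0)) = pvFmtN s (a, b) := by
  have hcast : (b : Int) - 1 = ((b - 1 : Nat) : Int) := by omega
  rw [hcast]
  simp only [PySem.List.pyGetD_natCast, pvFmtN]
  by_cases hab : b = a + 1
  · rw [if_pos (by exact_mod_cast hab), if_pos hab]
  · rw [if_neg (fun hh => hab (by exact_mod_cast hh)), if_neg hab]

-- bridge: port B equals the Nat-level staged computation on a nonempty input
theorem pvAltEq (cpus : List Int) (hnil : cpus ≠ []) :
    format_cpu_list_py_alt cpus =
      PySem.Str.join ", " (pvPartsN (PySem.List.sorted cpus (fun x => x) false)) := by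
  unfold format_cpu_list_py_alt
  rw [if_neg hnil]
  have hs : PySem.List.sorted cpus (fun x => x) false ≠ [] := by
    rw [Ne, PySem.List.sorted_eq_nil_iff]; exact hnil
  set s := PySem.List.sorted cpus (fun x => x) false with hsdef
  simp only [pvCastFilter s]
  have hc2 : (([(0:Int)] ++ (pvBrks s).map (fun k : Nat => (k : Int)) ++ [(s.length : Int)]) :
      List Int) = (0 :: pvTail s).map (fun k : Nat => (k : Int)) := by
    simp [pvTail]
  rw [hc2]
  have hsl : PySem.List.slice ((0 :: pvTail s).map (fun k : Nat => (k : Int))) (some 1) none =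
      ((0 :: pvTail s).map (fun k : Nat => (k : Int))).drop 1 := by
    rw [PySem.List.slice_from _ (by norm_num)]
    norm_num
  rw [hsl]
  have hdrop : ((0 :: pvTail s).map (fun k : Nat => (k : Int))).drop 1 =
      (pvTail s).map (fun k : Nat => (k : Int)) := rfl
  rw [hdrop, List.zip_map, List.map_map]
  congr 1
  apply List.map_congr_left
  intro p hp
  obtain ⟨a, b⟩ := p
  have hb : 1 ≤ b := pvTail_pos s hs b (List.of_mem_zip hp).2
  simpa [Prod.map] using pvFmtCast s a b hb

theorem format_cpu_list_py_spec : Claim_equal_format_cpu_list_py := by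
  unfold Claim_equal_format_cpu_list_py
  intro cpus _
  unfold Spec_format_cpu_list_py
  by_cases hnil : cpus = []
  · simp [hnil, format_cpu_list_py, format_cpu_list_py_alt]
  · rw [pvAltEq cpus hnil]
    unfold format_cpu_list_py
    simp only [if_neg hnil]
    have hs : PySem.List.sorted cpus (fun x => x) false ≠ [] := by
      rw [Ne, PySem.List.sorted_eq_nil_iff]; exact hnil
    rcases hsc : PySem.List.sorted cpus (fun x => x) false with _ | ⟨h, t⟩
    · exact absurd hsc hs
    · rw [pvPartsN_eq t h]
      show PySem.Str.join ", " (pvFinA (t.foldl pvStepA ([], h, h))) = _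
      rw [pvFoldlA, pvGroupRuns_decomp]
      simp
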